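-- pv_equiv track=rewrite | github.com/BEKO2210/AI_Architect | fix_ascii_art_fences.py | validate_code_blocks
-- ===== SOURCE A (Python) =====
-- def validate_code_blocks(lines: list[str]) -> list[str]:
--     """Check that all code blocks are properly opened and closed."""
--     issues = []
--     in_code_block = False
--     open_line = None
--
--     for i, line in enumerate(lines, 1):
--         stripped = line.rstrip()
--         if stripped.startswith("```"):
--             if not in_code_block:
--                 in_code_block = True
--                 open_line = i
--             else:
--                 in_code_block = False
--                 open_line = None
--
--     if in_code_block:
--         issues.append(f"Unclosed code block starting at line {open_line}")
--
--     return issues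
-- ===== SOURCE B (Python) =====
-- def validate_code_blocks(lines: list[str]) -> list[str]:
--     """Check that all code blocks are properly opened and closed."""
--     fences = [i for i, line in enumerate(lines, 1)
--               if line.rstrip().startswith("```")]
--     if len(fences) % 2 == 1:
--         return [f"Unclosed code block starting at line {fences[-1]}"]
--     return []
-- ===== Notes on version B (the rewrite author's own statement) =====
-- stated objective: simpler
-- what changed: Replaces the boolean toggle / open_line state machine with one comprehension collecting fence line numbers, deciding by parity of their count and reporting the last one.
import Mathlib
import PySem

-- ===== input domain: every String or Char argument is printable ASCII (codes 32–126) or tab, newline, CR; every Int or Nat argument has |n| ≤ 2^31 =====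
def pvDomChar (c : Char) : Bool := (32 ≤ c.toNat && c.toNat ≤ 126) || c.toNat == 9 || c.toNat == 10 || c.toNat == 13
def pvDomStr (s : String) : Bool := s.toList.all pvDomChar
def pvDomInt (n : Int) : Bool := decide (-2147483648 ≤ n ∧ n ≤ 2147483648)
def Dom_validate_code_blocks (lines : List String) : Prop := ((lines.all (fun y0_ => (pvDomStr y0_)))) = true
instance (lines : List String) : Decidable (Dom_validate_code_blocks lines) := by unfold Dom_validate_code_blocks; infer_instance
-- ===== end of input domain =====

-- B replaces A's boolean-toggle/open_line state machine by collecting the fence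
-- line numbers in one pass and deciding from the parity of their count (objective: simpler).


-- shared test 'line.rstrip().startswith("```")' appearing verbatim in both Pythons
def vcbFence (line : String) : Bool :=
  PySem.Str.startswith (PySem.Str.rstrip line) "```"

-- ===== PORT A =====
-- the per-line step of A's loop: state = (in_code_block, open_line)
def vcbStep (s : Bool × Option Int) (p : Int × String) : Bool × Option Int :=
  if vcbFence p.2 then
    if !s.1 then (true, some p.1) else (false, none)
  else s

def validate_code_blocks (lines : List String) : List String :=
  let issues : List String := []
  let st := (PySem.List.enumerate lines 1).foldl vcbStep (false, none)
  if st.1 then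
    issues ++ ["Unclosed code block starting at line " ++ PySem.Int.toStr (st.2.getD 0)]
  else issues

-- ===== PORT B =====
def validate_code_blocks_alt (lines : List String) : List String :=
  let fences := ((PySem.List.enumerate lines 1).filter (fun p => vcbFence p.2)).map (·.1)
  if fences.length % 2 == 1 then
    ["Unclosed code block starting at line " ++
      PySem.Int.toStr ((PySem.List.pyGet? fences (-1)).getD 0)]
  else []

-- ===== PRECONDITION & SPEC =====
def Spec_validate_code_blocks (lines : List String) (out : List String) : Prop := out = validate_code_blocks_alt lines
instance (lines : List String) (out : List String) : Decidable (Spec_validate_code_blocks lines out) := by unfold Spec_validate_code_blocks; infer_instance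

-- ===== CLAIM (what is proved, stated in full; the proofs are below) =====
def Claim_equal_validate_code_blocks : Prop := ∀ (lines : List String), Dom_validate_code_blocks lines → Spec_validate_code_blocks lines (validate_code_blocks lines)

-- ===== LEMMAS AND PROOFS =====

-- The fold's final state, characterised by the fence positions of the processed list.
theorem vcb_foldl_char (xs : List (Int × String)) (b : Bool) (o : Option Int) :
    xs.foldl vcbStep (b, o) =
      (let fs := (xs.filter (fun p => vcbFence p.2)).map (·.1)
       match fs.getLast? with
       | none => (b, o)
       | some l => if b != (fs.length % 2 == 1) then (true, some l) else (false, none)) := by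
  induction xs generalizing b o with
  | nil => simp
  | cons p rest ih =>
    simp only [List.foldl_cons]
    by_cases hc : vcbFence p.2 = true
    · have hstep : vcbStep (b, o) p = if !b then (true, some p.1) else (false, none) := by
        simp only [vcbStep, hc, if_pos]
      rw [hstep]; simp only [List.filter_cons, hc, if_true, List.map_cons]
      cases hfs : (List.filter (fun p => vcbFence p.2) rest).map (·.1) with
      | nil =>
        cases b <;>
          simp only [Bool.not_true, Bool.not_false, if_true, ih, hfs] <;> rfl
      | cons y ys =>
        have hlast : (p.1 :: y :: ys).getLast? = (y :: ys).getLast? := by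
          simp [List.getLast?_cons_cons]
        have hparity : ((y :: ys).length % 2 == 1) = !((p.1 :: y :: ys).length % 2 == 1) := by
          rcases Nat.mod_two_eq_zero_or_one ys.length with h | h <;>
            simp [List.length_cons, Nat.add_mod, h]
        obtain ⟨l, hl⟩ : ∃ l, (y :: ys).getLast? = some l :=
          Option.isSome_iff_exists.mp (List.getLast?_isSome.mpr (by simp))
        cases b with
        | false =>
          simp only [Bool.not_false, if_true, ih, hfs, hlast, hparity, hl]
          cases h : ((p.1 :: y :: ys).length % 2 == 1) <;> simp
        | true =>
          simp only [Bool.not_true, ih, hfs, hlast, hparity, hl]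
          cases h : ((p.1 :: y :: ys).length % 2 == 1) <;> simp
    · have hstep : vcbStep (b, o) p = (b, o) := by
        simp [vcbStep, hc]
      rw [hstep, ih]; simp only [List.filter_cons, hc, if_false, Bool.false_eq_true]

-- ===== VERDICT (by name: the statement is the Claim_ definition above) =====
theorem validate_code_blocks_spec : Claim_equal_validate_code_blocks := by
  intro lines _
  unfold Spec_validate_code_blocks validate_code_blocks validate_code_blocks_alt
  simp only [vcb_foldl_char]
  cases hfs : ((PySem.List.enumerate lines 1).filter (fun p => vcbFence p.2)).map (·.1) with
  | nil => simp
  | cons y ys =>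
    rw [PySem.List.pyGet?_neg_one]
    cases hlast : (y :: ys).getLast? with
    | none => simp [List.getLast?_eq_none_iff] at hlast
    | some l =>
      cases h : ((y :: ys).length % 2 == 1) <;> simp
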